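-- pv_equiv track=rewrite | github.com/alifarhan7974/FarhanAliInterviewPrep | problems/anagrams.py | anagram_with_dict
-- ===== SOURCE A (Python) =====
-- def anagram_with_dict(word: str, test_word: str) -> bool:
--   letter_count = dict()
--   for letter in word:
--     if letter in letter_count:
--       letter_count[letter] += 1
--     else:
--       letter_count[letter] = 1
--
--
--   for char in test_word:
--      if char not in letter_count:
--         return False
--      letter_count[char] -= 1
--      if letter_count[char] < 0:
--         return False
--
--   return list(letter_count.values()) == [0 for i in range(len(letter_count))]
-- ===== SOURCE B (Python) =====
-- def anagram_with_dict(word: str, test_word: str) -> bool: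
--   return sorted(word) == sorted(test_word)
-- ===== Notes on version B (the rewrite author's own statement) =====
-- stated objective: idiomatic
-- what changed: Replaces the hand-built count dictionary with decrement loop and final all-zero check by a one-line sort-and-compare of the two character sequences.
import Mathlib
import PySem

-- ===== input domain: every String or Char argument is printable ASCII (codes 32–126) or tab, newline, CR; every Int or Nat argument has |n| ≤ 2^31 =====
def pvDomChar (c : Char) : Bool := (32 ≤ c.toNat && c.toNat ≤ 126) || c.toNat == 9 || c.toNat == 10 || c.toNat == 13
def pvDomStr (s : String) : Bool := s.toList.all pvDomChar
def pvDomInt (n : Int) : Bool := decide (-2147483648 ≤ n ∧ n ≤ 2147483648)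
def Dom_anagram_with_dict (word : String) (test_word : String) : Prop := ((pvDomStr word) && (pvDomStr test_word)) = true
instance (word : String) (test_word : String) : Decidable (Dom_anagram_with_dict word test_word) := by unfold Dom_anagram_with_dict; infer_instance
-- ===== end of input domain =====

-- B replaces A's count-dictionary-and-decrement anagram check by a sort-and-compare of the two character lists (idiomatic, not faster).


-- ===== PORT A =====
-- first loop: build letter_count (membership test, += 1 / = 1)
def pvBuild (d : PySem.Dict Char Int) (c : Char) : PySem.Dict Char Int :=
  if d.contains c then d.insert c (d.getD c 0 + 1) else d.insert c 1

-- second loop with its two early returns, then the final values == [0]*len check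
def pvLoop : PySem.Dict Char Int → List Char → Bool
  | d, [] => d.values == (PySem.List.pyRange 0 (d.size : Int) 1).map (fun _ => (0 : Int))
  | d, c :: cs =>
      if d.contains c = false then false
      else
        let d' := d.insert c (d.getD c 0 - 1)
        if d'.getD c 0 < 0 then false else pvLoop d' cs

def anagram_with_dict (word : String) (test_word : String) : Bool :=
  pvLoop (word.toList.foldl pvBuild PySem.Dict.empty) test_word.toList

-- ===== PORT B =====
def anagram_with_dict_alt (word : String) (test_word : String) : Bool :=
  PySem.List.sorted word.toList (fun x => x) false == PySem.List.sorted test_word.toList (fun x => x) false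

-- ===== PRECONDITION & SPEC =====
def Spec_anagram_with_dict (word : String) (test_word : String) (out : Bool) : Prop := out = anagram_with_dict_alt word test_word
instance (word : String) (test_word : String) (out : Bool) : Decidable (Spec_anagram_with_dict word test_word out) := by unfold Spec_anagram_with_dict; infer_instance

-- ===== CLAIM (what is proved, stated in full; the proofs are below) =====
def Claim_equal_anagram_with_dict : Prop := ∀ (word : String) (test_word : String), Dom_anagram_with_dict word test_word → Spec_anagram_with_dict word test_word (anagram_with_dict word test_word)

-- ===== LEMMAS AND PROOFS =====

-- the branchy build step is the standard counting step
theorem pvBuild_eq (d : PySem.Dict Char Int) (c : Char) :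
    pvBuild d c = d.insert c (d.getD c 0 + 1) := by
  unfold pvBuild
  split_ifs with h
  · rfl
  · rw [PySem.Dict.getD_of_not_contains d (0 : Int) (by simpa using h)]
    norm_num

theorem pvBuild_foldl_eq_counter (l : List Char) :
    l.foldl pvBuild PySem.Dict.empty = PySem.Dict.counter l := by
  rw [show pvBuild = fun d c => d.insert c (d.getD c 0 + 1) from
        funext fun d => funext fun c => pvBuild_eq d c]
  exact PySem.Dict.foldl_insert_getD_add_one_eq_counter l

-- characterisation of A's consuming loop
theorem pvLoop_iff (cs : List Char) (d : PySem.Dict Char Int) (hnd : d.keys.Nodup) :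
    pvLoop d cs = true ↔ ∀ c, (c ∈ d.keys ∨ c ∈ cs) → d.getD c 0 = (cs.count c : Int) := by
  induction cs generalizing d with
  | nil =>
      simp only [pvLoop, List.count_nil, List.not_mem_nil, or_false, Nat.cast_zero]
      rw [beq_iff_eq, PySem.Dict.values_eq_map_keys d hnd 0]
      have h1 : (PySem.List.pyRange 0 (d.size : Int) 1).map (fun _ => (0 : Int))
          = List.replicate d.keys.length (0 : Int) := by
        rw [List.map_const']
        congr 1
        rw [PySem.List.length_pyRange_one]
        simp [PySem.Dict.size, PySem.Dict.keys]
      rw [h1, List.eq_replicate_iff]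
      simp
  | cons c cs ih =>
      simp only [pvLoop]
      by_cases hc : d.contains c = true
      · rw [if_neg (by simp [hc])]
        have hg : (d.insert c (d.getD c 0 - 1)).getD c 0 = d.getD c 0 - 1 :=
          PySem.Dict.getD_insert_self d c (d.getD c 0 - 1) 0
        have hcmem : c ∈ d.keys := (PySem.Dict.contains_iff_mem_keys d c).mp hc
        by_cases hneg : d.getD c 0 - 1 < 0
        · rw [if_pos (by rw [hg]; exact hneg)]
          simp only [Bool.false_eq_true, false_iff]
          intro hall
          have h2 := hall c (Or.inl hcmem)
          rw [List.count_cons_self] at h2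
          push_cast at h2
          omega
        · rw [if_neg (by rw [hg]; exact hneg)]
          rw [ih _ (PySem.Dict.nodup_keys_insert d c _ hnd)]
          have hkeys : (d.insert c (d.getD c 0 - 1)).keys = d.keys :=
            PySem.Dict.keys_insert_of_contains d _ hc
          constructor
          · intro h x hx
            have hx' : x ∈ d.keys ∨ x ∈ cs := by
              rcases hx with h1 | h1
              · exact Or.inl h1
              · rcases List.mem_cons.mp h1 with rfl | h2
                · exact Or.inl hcmem
                · exact Or.inr h2
            have h3 := h x (by rw [hkeys]; exact hx')
            rw [PySem.Dict.getD_insert] at h3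
            by_cases hxc : x = c
            · subst hxc
              rw [if_pos rfl] at h3
              rw [List.count_cons_self]
              push_cast
              omega
            · rw [if_neg hxc] at h3
              simp [Ne.symm hxc]
              exact h3
          · intro h x hx
            rw [hkeys] at hx
            have hx' : x ∈ d.keys ∨ x ∈ c :: cs := by
              rcases hx with h1 | h1
              · exact Or.inl h1
              · exact Or.inr (List.mem_cons_of_mem _ h1)
            have h3 := h x hx'
            rw [PySem.Dict.getD_insert]
            by_cases hxc : x = c
            · subst hxc
              rw [if_pos rfl]
              rw [List.count_cons_self] at h3
              push_cast at h3
              omega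
            · rw [if_neg hxc]
              simp [Ne.symm hxc] at h3
              exact h3
      · rw [if_pos (by simpa using hc)]
        simp only [Bool.false_eq_true, false_iff]
        intro hall
        have h2 := hall c (Or.inr (List.mem_cons_self))
        rw [PySem.Dict.getD_of_not_contains d 0 (by simpa using hc),
            List.count_cons_self] at h2
        push_cast at h2
        omega

theorem anagram_with_dict_true_iff (word test_word : String) :
    anagram_with_dict word test_word = true ↔ word.toList.Perm test_word.toList := by
  unfold anagram_with_dict
  rw [pvBuild_foldl_eq_counter,
      pvLoop_iff _ _ (PySem.Dict.nodup_keys_counter _)]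
  constructor
  · intro h
    rw [List.perm_iff_count]
    intro c
    by_cases hc : c ∈ word.toList ∨ c ∈ test_word.toList
    · have := h c (by
        rcases hc with h1 | h1
        · exact Or.inl (by rw [PySem.Dict.keys_counter]; exact (PySem.Set.mem_ofList _ _).mpr h1)
        · exact Or.inr h1)
      rw [PySem.Dict.getD_counter] at this
      exact_mod_cast this
    · push Not at hc
      rw [List.count_eq_zero_of_not_mem hc.1, List.count_eq_zero_of_not_mem hc.2]
  · intro h c _
    rw [PySem.Dict.getD_counter]
    exact_mod_cast (List.perm_iff_count.mp h) c

theorem anagram_with_dict_alt_true_iff (word test_word : String) :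
    anagram_with_dict_alt word test_word = true ↔ word.toList.Perm test_word.toList := by
  unfold anagram_with_dict_alt
  rw [beq_iff_eq]
  exact PySem.List.sorted_id_eq_sorted_id_iff_perm word.toList test_word.toList

-- ===== VERDICT (by name: the statement is the Claim_ definition above) =====
theorem anagram_with_dict_spec : Claim_equal_anagram_with_dict := by
  intro word test_word _
  show anagram_with_dict word test_word = anagram_with_dict_alt word test_word
  rw [Bool.eq_iff_iff, anagram_with_dict_true_iff, anagram_with_dict_alt_true_iff]
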